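-- pv_equiv track=rewrite | github.com/huawei-noah/SMARTS | src/zoo/evaluation/metrics/kinematics/kinematics_evaluation.py | acceleration_detection
-- ===== SOURCE A (Python) =====
-- def acceleration_detection(acceleration_list):
--     result_list = []
--     max_acceleration = 8
--     for step, accel in enumerate(acceleration_list):
--         if step == 0 and abs(accel) > max_acceleration:
--             result_list.append(step)
--         elif step != 0 and abs(accel) > max_acceleration >= abs(
--             acceleration_list[step - 1]
--         ):
--             result_list.append(step)
--     return result_list
-- ===== SOURCE B (Python) =====
-- def acceleration_detection(acceleration_list):
--     # Run-length detection: scan maximal runs of same over/under-threshold key,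
--     # emitting the start index of every over-threshold run.
--     result_list = []
--     i = 0
--     n = len(acceleration_list)
--     while i < n:
--         over = abs(acceleration_list[i]) > 8
--         j = i + 1
--         while j < n and (abs(acceleration_list[j]) > 8) == over:
--             j += 1
--         if over:
--             result_list.append(i)
--         i = j
--     return result_list
-- ===== Notes on version B (the rewrite author's own statement) =====
-- stated objective: alternative
-- what changed: A tests every index's rising edge against its predecessor via enumerate plus a back-index; B detects maximal runs of consecutive over/under-threshold values with a two-pointer scan and emits each over-threshold run's start index, with no back-indexing.
import Mathlib
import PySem

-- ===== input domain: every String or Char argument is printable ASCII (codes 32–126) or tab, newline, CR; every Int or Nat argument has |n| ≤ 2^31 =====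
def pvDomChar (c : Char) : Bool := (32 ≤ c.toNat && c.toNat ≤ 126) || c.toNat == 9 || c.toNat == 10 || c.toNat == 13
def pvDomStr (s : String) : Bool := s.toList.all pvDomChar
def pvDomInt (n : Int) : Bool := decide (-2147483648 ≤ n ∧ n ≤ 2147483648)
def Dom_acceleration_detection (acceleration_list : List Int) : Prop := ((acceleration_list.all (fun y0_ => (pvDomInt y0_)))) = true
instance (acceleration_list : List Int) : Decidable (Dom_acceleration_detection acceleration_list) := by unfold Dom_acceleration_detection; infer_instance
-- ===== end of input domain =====

-- B replaces A's per-index rising-edge test (enumerate + back-index) by a run-length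
-- two-pointer scan emitting the start index of each over-threshold run: alternative
-- decomposition, same O(n) cost.

-- ===== PORT A =====
-- loop body of A: the two branches in source order; acceleration_list[step-1] is
-- ported as pyGetD (exact here: the branch only fires for step ≠ 0, where the index
-- is in range, so Python never raises and the default is never used)
def pvStepA (l : List Int) (result_list : List Int) (p : Int × Int) : List Int :=
  if p.1 = 0 ∧ 8 < |p.2| then result_list ++ [p.1]
  else if p.1 ≠ 0 ∧ 8 < |p.2| ∧ 8 ≥ |PySem.List.pyGetD l (p.1 - 1) 0| then result_list ++ [p.1]
  else result_list

def acceleration_detection (acceleration_list : List Int) : List Int :=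
  (PySem.List.enumerate acceleration_list).foldl (pvStepA acceleration_list) []

-- ===== PORT B =====
-- inner while loop of B: skip the rest of the current run (same key), returning the
-- remaining suffix and how many elements were skipped
def pvSkipRun (key : Bool) : List Int → List Int × Nat
  | [] => ([], 0)
  | y :: ys =>
    if (decide (8 < |y|)) = key then
      let r := pvSkipRun key ys
      (r.1, r.2 + 1)
    else (y :: ys, 0)

theorem pvSkipRun_length (key : Bool) (ys : List Int) :
    (pvSkipRun key ys).1.length ≤ ys.length := by
  induction ys with
  | nil => simp [pvSkipRun]
  | cons y ys ih =>
    simp only [pvSkipRun]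
    split
    · simpa using Nat.le_succ_of_le ih
    · simp

-- outer while loop of B: i is the current absolute index, the list argument the
-- remaining suffix from i
def pvRuns : List Int → Int → List Int
  | [], _ => []
  | x :: xs, i =>
    let key := decide (8 < |x|)
    let r := pvSkipRun key xs
    (if key then [i] else []) ++ pvRuns r.1 (i + 1 + r.2)
termination_by l _ => l.length
decreasing_by
  exact Nat.lt_succ_of_le (pvSkipRun_length _ _)

def acceleration_detection_alt (acceleration_list : List Int) : List Int :=
  pvRuns acceleration_list 0

-- ===== PRECONDITION & SPEC =====
def Spec_acceleration_detection (acceleration_list : List Int) (out : List Int) : Prop := out = acceleration_detection_alt acceleration_list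
instance (acceleration_list : List Int) (out : List Int) : Decidable (Spec_acceleration_detection acceleration_list out) := by unfold Spec_acceleration_detection; infer_instance

-- ===== CLAIM (what is proved, stated in full; the proofs are below) =====
def Claim_equal_acceleration_detection : Prop := ∀ (acceleration_list : List Int), Dom_acceleration_detection acceleration_list → Spec_acceleration_detection acceleration_list (acceleration_detection acceleration_list)

-- ===== LEMMAS AND PROOFS =====

-- common specification: pvGo prev i l emits index i+k for each element whose |·| > 8
-- while the previous element (prev for k = 0) is not over the threshold
def pvGo (prev : Bool) (i : Int) : List Int → List Int
  | [] => []
  | x :: xs => (if decide (8 < |x|) && !prev then [i] else []) ++ pvGo (decide (8 < |x|)) (i + 1) xs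

theorem pvSkipRun_head (key : Bool) (ys : List Int) :
    ∀ z ∈ (pvSkipRun key ys).1.head?, decide (8 < |z|) ≠ key := by
  induction ys with
  | nil => simp [pvSkipRun]
  | cons y ys ih =>
    simp only [pvSkipRun]
    split
    · simpa using ih
    · rename_i h; simpa using h

theorem pvSkipRun_go (key : Bool) (ys : List Int) (i : Int) :
    pvGo key i ys = pvGo key (i + (pvSkipRun key ys).2) (pvSkipRun key ys).1 := by
  induction ys generalizing i with
  | nil => simp [pvSkipRun, pvGo]
  | cons y ys ih =>
    simp only [pvSkipRun]
    split
    · rename_i h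
      have hif : (if decide (8 < |y|) && !key then [i] else []) = ([] : List Int) := by
        rw [h]; cases key <;> simp
      have hstep : pvGo key i (y :: ys)
          = pvGo key (i + 1) ys := by
        conv_lhs => rw [pvGo]
        rw [hif, h, List.nil_append]
      rw [hstep, ih (i + 1)]
      congr 1
      push_cast
      ring
    · simp

theorem pvRuns_eq_go : ∀ (n : Nat) (l : List Int) (i : Int) (prev : Bool),
    l.length ≤ n →
    (∀ z ∈ l.head?, prev = true → ¬ (8 < |z|)) →
    pvRuns l i = pvGo prev i l := by
  intro n
  induction n with
  | zero =>
    intro l i prev hl _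
    have : l = [] := List.eq_nil_of_length_eq_zero (Nat.le_zero.mp hl)
    subst this; simp [pvRuns, pvGo]
  | succ n ih =>
    intro l i prev hl hhead
    match l with
    | [] => simp [pvRuns, pvGo]
    | x :: xs =>
      rw [pvRuns]
      have hrest := ih (pvSkipRun (decide (8 < |x|)) xs).1 (i + 1 + (pvSkipRun (decide (8 < |x|)) xs).2)
        (decide (8 < |x|))
        (le_trans (pvSkipRun_length _ _) (by simpa using Nat.lt_succ_iff.mp (Nat.lt_of_lt_of_le (by simp) hl)))
        (by
          intro z hz hkey
          have := pvSkipRun_head (decide (8 < |x|)) xs z hz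
          rw [hkey] at this
          simpa using this)
      rw [hrest, ← pvSkipRun_go]
      simp only [pvGo]
      congr 1
      by_cases hx : 8 < |x|
      · have : prev = false := by
          cases prev
          · rfl
          · exact absurd hx (hhead x rfl rfl)
        simp [hx, this]
      · simp [hx]

-- previous-element flag for a processed prefix: whether its last element is over threshold
def pvPrevFlag (pre : List Int) : Bool :=
  decide (8 < |pre.getLast?.getD 0|)

theorem pvA_fold (l : List Int) :
    ∀ (suf pre : List Int) (acc : List Int), l = pre ++ suf →
    (PySem.List.enumerate suf (pre.length : Int)).foldl (pvStepA l) acc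
      = acc ++ pvGo (pvPrevFlag pre) (pre.length : Int) suf := by
  intro suf
  induction suf with
  | nil => intro pre acc _; simp [PySem.List.enumerate_nil, pvGo]
  | cons x xs ih =>
    intro pre acc hl
    rw [PySem.List.enumerate_cons, List.foldl_cons]
    have hpre' : l = (pre ++ [x]) ++ xs := by simpa using hl
    have hlen : ((pre ++ [x]).length : Int) = (pre.length : Int) + 1 := by simp
    have := ih (pre ++ [x]) (pvStepA l acc ((pre.length : Int), x)) hpre'
    rw [hlen] at this
    rw [this]
    have hflag : pvPrevFlag (pre ++ [x]) = decide (8 < |x|) := by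
      simp [pvPrevFlag]
    rw [hflag]
    have hstep : pvStepA l acc ((pre.length : Int), x)
        = acc ++ (if decide (8 < |x|) && !pvPrevFlag pre then [(pre.length : Int)] else []) := by
      match pre with
      | [] =>
        subst hl
        simp only [pvStepA, pvPrevFlag]
        by_cases hx : 8 < |x| <;> simp [hx]
      | p :: ps =>
        have hne : ((p :: ps).length : Int) ≠ 0 := by
          simp only [List.length_cons]
          omega
        have hprev : PySem.List.pyGetD l (((p :: ps).length : Int) - 1) 0
            = (p :: ps).getLast?.getD 0 := by
          have hcast : ((p :: ps).length : Int) - 1 = ((ps.length : Nat) : Int) := by simp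
          rw [hcast, PySem.List.pyGetD_natCast, hl, List.getD_eq_getElem?_getD,
            List.getElem?_append_left (by simp), List.getLast?_eq_getElem?]
          simp
        simp only [pvStepA, hne, hprev, pvPrevFlag]
        by_cases hx : 8 < |x| <;> by_cases hp : 8 < |(p :: ps).getLast?.getD 0| <;>
          simp [hx, hp] <;> omega
    rw [hstep, List.append_assoc]
    simp [pvGo]

-- ===== VERDICT (by name: the statement is the Claim_ definition above) =====
theorem acceleration_detection_spec : Claim_equal_acceleration_detection := by
  intro l _
  unfold Spec_acceleration_detection
  show acceleration_detection l = acceleration_detection_alt l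
  unfold acceleration_detection acceleration_detection_alt
  have h := pvA_fold l l [] [] rfl
  simp only [List.length_nil, Nat.cast_zero] at h
  rw [h, pvRuns_eq_go l.length l 0 false le_rfl (by simp)]
  simp [pvPrevFlag]
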